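-- pv_equiv track=rewrite | github.com/Khim3/DSA_Project | MergeSort.py | color_array
-- ===== SOURCE A (Python) =====
-- def color_array(length, left, middle, right):
--     color_array = []
--     for i in range(length):
--         if left <= i <= right:
--             color_array.append('yellow')
--         else:
--             color_array.append('blue')
--     return color_array
-- ===== SOURCE B (Python) =====
-- def color_array(length, left, middle, right):
--     lo = min(max(left, 0), length)
--     hi = max(min(max(right + 1, 0), length), lo)
--     return ['blue'] * lo + ['yellow'] * (hi - lo) + ['blue'] * (length - hi)
-- ===== Notes on version B (the rewrite author's own statement) =====
-- stated objective: simpler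
-- what changed: Replaces the per-index loop with a per-index conditional by computing clamped run lengths and emitting the blue prefix, yellow run and blue suffix as three bulk segments.
import Mathlib
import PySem

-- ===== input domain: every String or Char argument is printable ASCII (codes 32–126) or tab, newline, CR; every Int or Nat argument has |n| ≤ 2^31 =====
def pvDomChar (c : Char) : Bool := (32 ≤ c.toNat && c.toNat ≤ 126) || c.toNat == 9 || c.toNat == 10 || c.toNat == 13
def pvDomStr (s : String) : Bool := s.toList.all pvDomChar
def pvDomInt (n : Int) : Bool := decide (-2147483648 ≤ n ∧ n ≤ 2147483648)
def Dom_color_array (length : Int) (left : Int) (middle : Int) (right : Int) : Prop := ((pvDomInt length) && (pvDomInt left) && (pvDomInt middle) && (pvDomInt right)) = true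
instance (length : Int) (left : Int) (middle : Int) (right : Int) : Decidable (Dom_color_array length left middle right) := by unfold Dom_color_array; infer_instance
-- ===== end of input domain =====

-- B replaces A's per-index conditional loop by three bulk segments from clamped run lengths (objective: simpler).

-- ===== PORT A =====
def color_array (length : Int) (left : Int) (middle : Int) (right : Int) : List String :=
  (PySem.List.pyRange 0 length 1).foldl
    (fun acc i => acc ++ [if left ≤ i ∧ i ≤ right then "yellow" else "blue"]) []

-- ===== PORT B =====
def color_array_alt (length : Int) (left : Int) (middle : Int) (right : Int) : List String :=
  let lo := min (max left 0) length
  let hi := max (min (max (right + 1) 0) length) lo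
  List.replicate lo.toNat "blue" ++ List.replicate (hi - lo).toNat "yellow"
    ++ List.replicate (length - hi).toNat "blue"

-- ===== PRECONDITION & SPEC =====
def Spec_color_array (length : Int) (left : Int) (middle : Int) (right : Int) (out : List String) : Prop := out = color_array_alt length left middle right
instance (length : Int) (left : Int) (middle : Int) (right : Int) (out : List String) : Decidable (Spec_color_array length left middle right out) := by unfold Spec_color_array; infer_instance

-- ===== CLAIM (what is proved, stated in full; the proofs are below) =====
def Claim_equal_color_array : Prop := ∀ (length : Int) (left : Int) (middle : Int) (right : Int), Dom_color_array length left middle right → Spec_color_array length left middle right (color_array length left middle right)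

-- ===== LEMMAS AND PROOFS =====

theorem color_array_eq_alt (length left middle right : Int) :
    color_array length left middle right = color_array_alt length left middle right := by
  unfold color_array color_array_alt
  rw [PySem.List.foldl_append_singleton_eq_map, PySem.List.pyRange_one]
  simp only [List.nil_append, List.map_map, Int.sub_zero]
  apply List.ext_getElem
  · simp only [List.length_map, List.length_range, List.length_append, List.length_replicate]
    omega
  · intro k h1 h2
    simp only [List.getElem_map, List.getElem_range, Function.comp_apply, Int.zero_add]
    simp only [List.append_assoc]
    rcases Nat.lt_or_ge k (min (max left 0) length).toNat with hk | hk
    · rw [List.getElem_append_left (by simp only [List.length_replicate]; omega)]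
      rw [List.getElem_replicate]
      rw [if_neg]
      simp only [List.length_map, List.length_range] at h1
      omega
    · rw [List.getElem_append_right (by simp only [List.length_replicate]; omega)]
      simp only [List.length_replicate]
      rcases Nat.lt_or_ge (k - (min (max left 0) length).toNat)
          ((max (min (max (right + 1) 0) length) (min (max left 0) length)
            - min (max left 0) length).toNat) with hk2 | hk2
      · rw [List.getElem_append_left (by simp only [List.length_replicate]; omega)]
        rw [List.getElem_replicate]
        rw [if_pos]
        simp only [List.length_map, List.length_range] at h1
        omega
      · rw [List.getElem_append_right (by simp only [List.length_replicate]; omega)]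
        rw [List.getElem_replicate]
        rw [if_neg]
        simp only [List.length_map, List.length_range] at h1
        omega

-- ===== VERDICT (by name: the statement is the Claim_ definition above) =====
theorem color_array_spec : Claim_equal_color_array := by
  intro length left middle right _
  exact color_array_eq_alt length left middle right
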